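-- pv_equiv track=rewrite | github.com/TonyBorovyk/Lab_7-1- | Laba.py | step
-- ===== SOURCE A (Python) =====
-- def step(matrix):
--     array = []
--     for y in range(len(matrix) - 2):
--         arr = []
--         for i in range(len(matrix)):
--             count = 0
--             for j in range(len(matrix)):
--                 if matrix[i][j] == 1:
--                     count += 1
--             arr.append(count)
--         t = 0
--         for x in range(len(matrix)):
--             if arr[x] == 1 and t == 0:
--                 ind = x
--                 array.append(x + 1)
--                 arr[x] = 0
--                 t += 1
--                 for l in range(len(matrix)):
--                     matrix[l][ind] = 0
--                     matrix[ind][l] = 0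
--     return array
-- ===== SOURCE B (Python) =====
-- def step(matrix):
--     n = len(matrix)
--     deg = [row[:n].count(1) for row in matrix]
--     removed = [False] * n
--     out = []
--     for _ in range(n - 2):
--         ind = next((x for x in range(n) if deg[x] == 1), None)
--         if ind is None:
--             break
--         out.append(ind + 1)
--         removed[ind] = True
--         deg[ind] = 0
--         for l in range(n):
--             if not removed[l] and matrix[l][ind] == 1:
--                 deg[l] -= 1
--     return out
-- ===== Notes on version B (the rewrite author's own statement) =====
-- stated objective: faster
-- what changed: B computes each row's degree once, then maintains the degree vector incrementally on every removal (decrementing neighbours of the removed node) and breaks as soon as no degree-1 node exists, instead of recomputing the whole n*n degree table on each of the n-2 outer iterations.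
import Mathlib
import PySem

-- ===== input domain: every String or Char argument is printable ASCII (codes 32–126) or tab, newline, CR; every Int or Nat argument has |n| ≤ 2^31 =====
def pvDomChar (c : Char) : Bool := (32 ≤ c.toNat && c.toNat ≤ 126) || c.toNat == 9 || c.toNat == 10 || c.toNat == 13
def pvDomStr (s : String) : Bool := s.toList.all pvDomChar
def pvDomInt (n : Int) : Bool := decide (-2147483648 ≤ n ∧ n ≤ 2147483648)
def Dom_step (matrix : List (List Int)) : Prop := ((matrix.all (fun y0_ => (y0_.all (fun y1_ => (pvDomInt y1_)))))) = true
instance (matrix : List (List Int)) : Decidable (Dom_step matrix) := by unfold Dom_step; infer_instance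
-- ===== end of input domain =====

-- B computes degrees once and maintains them incrementally (O(n^2) vs A's O(n^3)).
-- A mutates its argument in place (zeroes removed rows/columns); B does not: equivalence is about the RETURN value only.

-- ===== PORT A =====
-- matrix[i][j] read (indices from range(), hence nonnegative and in range inside Pre_)
def pvGetCell (m : List (List Int)) (i j : Int) : Int :=
  PySem.List.pyGetD (PySem.List.pyGetD m i []) j 0

-- matrix[i][j] = 0 assignment
def pvSetCell (m : List (List Int)) (i j : Int) : List (List Int) :=
  m.set i.toNat ((m.getD i.toNat []).set j.toNat 0)

-- the j-loop computing 'count' for row i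
def pvDegRow (m : List (List Int)) (n : Nat) (i : Int) : Int :=
  (PySem.List.pyRange 0 (n : Int) 1).foldl
    (fun c j => if pvGetCell m i j = 1 then c + 1 else c) 0

-- the l-loop zeroing row 'ind' and column 'ind'
def pvZeroCross (m : List (List Int)) (n : Nat) (ind : Int) : List (List Int) :=
  (PySem.List.pyRange 0 (n : Int) 1).foldl (fun m l => pvSetCell (pvSetCell m l ind) ind l) m

-- body of the x-loop; state = (matrix, array, arr, t)
def pvInnerBody (n : Nat) (s : List (List Int) × List Int × List Int × Int) (x : Int) :
    List (List Int) × List Int × List Int × Int :=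
  if PySem.List.pyGetD s.2.2.1 x 0 = 1 ∧ s.2.2.2 = 0 then
    (pvZeroCross s.1 n x, s.2.1 ++ [x + 1], s.2.2.1.set x.toNat 0, s.2.2.2 + 1)
  else s

-- the i-loop building 'arr', the list of degrees
def pvArr (m : List (List Int)) (n : Nat) : List Int :=
  (PySem.List.pyRange 0 (n : Int) 1).foldl (fun arr i => arr ++ [pvDegRow m n i]) []

-- body of the y-loop; state = (matrix, array); the local 'arr' and 't' are dropped at the end
def pvOuterBody (n : Nat) (s : List (List Int) × List Int) (_y : Int) :
    List (List Int) × List Int :=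
  ((((PySem.List.pyRange 0 (n : Int) 1).foldl (pvInnerBody n) (s.1, s.2, pvArr s.1 n, 0)).1),
   (((PySem.List.pyRange 0 (n : Int) 1).foldl (pvInnerBody n) (s.1, s.2, pvArr s.1 n, 0)).2.1))

def step (matrix : List (List Int)) : List Int :=
  ((PySem.List.pyRange 0 ((matrix.length : Int) - 2) 1).foldl
      (pvOuterBody matrix.length) (matrix, [])).2

-- ===== PORT B =====
-- the l-loop decrementing the degrees of the removed node's still-present neighbours
def pvAltUpdate (matrix : List (List Int)) (n : Nat) (removed : List Bool)
    (deg : List Int) (ind : Nat) : List Int :=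
  (List.range n).foldl
    (fun deg l =>
      if !(removed.getD l false) && ((matrix.getD l []).getD ind 0 == 1) then
        deg.set l (deg.getD l 0 - 1)
      else deg) deg

-- the for-loop with early break, fuel = number of remaining iterations
def pvAltLoop (matrix : List (List Int)) (n : Nat) :
    Nat → List Int → List Bool → List Int → List Int
  | 0, _, _, out => out
  | fuel + 1, deg, removed, out =>
    match (List.range n).find? (fun x => deg.getD x 0 == 1) with
    | none => out
    | some ind =>
        pvAltLoop matrix n fuel
          (pvAltUpdate matrix n (removed.set ind true) ((deg.set ind 0)) ind)
          (removed.set ind true) (out ++ [(ind : Int) + 1])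

def step_alt (matrix : List (List Int)) : List Int :=
  let n := matrix.length
  let deg := matrix.map
    (fun row => ((PySem.List.count (PySem.List.slice row none (some (n : Int))) 1 : Nat) : Int))
  pvAltLoop matrix n (n - 2) deg (List.replicate n false) []

-- ===== PRECONDITION & SPEC =====
-- Pre_ excludes exactly the inputs on which Python A raises IndexError: matrices with
-- at least 3 rows in which some row is shorter than the number of rows.
def Pre_step (matrix : List (List Int)) : Prop :=
  matrix.length ≤ 2 ∨ ∀ row ∈ matrix, matrix.length ≤ row.length
instance (matrix : List (List Int)) : Decidable (Pre_step matrix) := by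
  unfold Pre_step; infer_instance

def pvWitness_step : List (List Int) := [[0, 1, 0], [1, 0, 1], [0, 1, 0]]

def Spec_step (matrix : List (List Int)) (out : List Int) : Prop := out = step_alt matrix
instance (matrix : List (List Int)) (out : List Int) : Decidable (Spec_step matrix out) := by
  unfold Spec_step; infer_instance

-- ===== CLAIM (what is proved, stated in full; the proofs are below) =====
def Claim_equal_step : Prop :=
  ∀ (matrix : List (List Int)), Dom_step matrix → Pre_step matrix →
    Spec_step matrix (step matrix)

-- ===== LEMMAS AND PROOFS =====

-- masked matrix entry: what A's mutated matrix holds at (i, j) after removing the nodes in r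
def mval (M : List (List Int)) (r : List Bool) (i j : Nat) : Int :=
  if r.getD i false || r.getD j false then 0 else (M.getD i []).getD j 0

-- reference degree of node i in the masked matrix
def refDeg (M : List (List Int)) (r : List Bool) (n i : Nat) : Int :=
  (((List.range n).countP (fun j => mval M r i j == 1) : Nat) : Int)

lemma find?_congrMem {a : Type} (l : List a) (p q : a → Bool)
    (h : ∀ x ∈ l, p x = q x) : l.find? p = l.find? q := by
  induction l with
  | nil => rfl
  | cons x t ih =>
      simp only [List.find?]
      rw [h x (List.mem_cons_self)]
      cases q x
      · exact ih (fun y hy => h y (List.mem_cons_of_mem _ hy))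
      · rfl

lemma countP_range_point {p q : Nat → Bool} (n x : Nat) (hx : x < n)
    (hagree : ∀ j, j ≠ x → p j = q j) (hp : p x = true) (hq : q x = false) :
    (List.range n).countP p = (List.range n).countP q + 1 := by
  induction n with
  | zero => omega
  | succ n ih =>
      rw [List.range_succ, List.countP_append, List.countP_append]
      by_cases hnx : n = x
      · subst hnx
        have : (List.range n).countP p = (List.range n).countP q := by
          apply List.countP_congr
          intro j hj
          rw [hagree j (by simp at hj; omega)]
        simp [hp, hq, this]
      · have := ih (by omega)
        simp [List.countP_cons, hagree n hnx, this]
        omega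

lemma getD_set {a : Type} (l : List a) (i k : Nat) (v d : a) :
    (l.set k v).getD i d = if i = k ∧ k < l.length then v else l.getD i d := by
  simp [List.getD, List.getElem?_set]
  split_ifs <;> simp_all

lemma pvSetCell_entry (m : List (List Int)) (a b i j : Nat) :
    ((pvSetCell m (a : Int) (b : Int)).getD i []).getD j 0 =
      if i = a ∧ j = b then 0 else (m.getD i []).getD j 0 := by
  unfold pvSetCell
  rw [show ((a : Int)).toNat = a from rfl, show ((b : Int)).toNat = b from rfl, getD_set]
  split_ifs with h1 h2 h2
  · obtain ⟨hia, hal⟩ := h1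
    obtain ⟨_, hjb⟩ := h2
    subst hia; subst hjb
    rw [getD_set]
    split_ifs with h3
    · rfl
    · exact List.getD_eq_default _ _ (by omega)
  · obtain ⟨hia, hal⟩ := h1
    subst hia
    have hjb : j ≠ b := fun h => h2 ⟨rfl, h⟩
    rw [getD_set]
    simp [hjb]
  · obtain ⟨hia, hjb⟩ := h2
    subst hia; subst hjb
    have hal : ¬ i < m.length := fun h => h1 ⟨rfl, h⟩
    have hm : m.getD i [] = [] := List.getD_eq_default _ _ (by omega)
    rw [hm]
    rfl
  · rfl

lemma zfold_entry (x0 : Nat) : ∀ (k : Nat) (m : List (List Int)) (i j : Nat),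
    (((List.range k).foldl
        (fun (m : List (List Int)) (l : Nat) => pvSetCell (pvSetCell m (l : Int) (x0 : Int)) (x0 : Int) (l : Int)) m).getD i []).getD j 0 =
      if (i < k ∧ j = x0) ∨ (i = x0 ∧ j < k) then 0 else (m.getD i []).getD j 0 := by
  intro k
  induction k with
  | zero => intro m i j; simp
  | succ k ih =>
      intro m i j
      rw [List.range_succ, List.foldl_append]
      simp only [List.foldl_cons, List.foldl_nil]
      rw [pvSetCell_entry, pvSetCell_entry, ih]
      split_ifs <;> omega

lemma pvZeroCross_entry (m : List (List Int)) (n : Nat) (x0 i j : Nat) :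
    ((pvZeroCross m n (x0 : Int)).getD i []).getD j 0 =
      if (i < n ∧ j = x0) ∨ (i = x0 ∧ j < n) then 0 else (m.getD i []).getD j 0 := by
  rw [pvZeroCross, PySem.List.pyRange_zero_natCast, List.foldl_map]
  exact zfold_entry x0 n m i j

lemma pvDegRow_eq (M m : List (List Int)) (r : List Bool) (n : Nat)
    (hm : ∀ i j, i < n → j < n → (m.getD i []).getD j 0 = mval M r i j)
    (i : Nat) (hi : i < n) :
    pvDegRow m n (i : Int) = refDeg M r n i := by
  unfold pvDegRow
  rw [PySem.List.pyRange_zero_natCast, List.foldl_map]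
  rw [show (fun (c : Int) (k : Nat) => if pvGetCell m (i : Int) (k : Int) = 1 then c + 1 else c)
        = (fun (c : Int) (k : Nat) =>
            if (fun (k : Nat) => decide (pvGetCell m (i : Int) ((k : Nat) : Int) = 1)) k = true then c + 1 else c)
      from by funext c k; simp]
  rw [PySem.List.foldl_count_if]
  rw [refDeg]
  have : (List.range n).countP (fun (k : Nat) => decide (pvGetCell m (i : Int) (k : Int) = 1))
      = (List.range n).countP (fun j => mval M r i j == 1) := by
    apply List.countP_congr
    intro k hk
    have hk' : k < n := List.mem_range.mp hk
    have : pvGetCell m (i : Int) (k : Int) = mval M r i k := by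
      unfold pvGetCell
      rw [PySem.List.pyGetD_natCast, PySem.List.pyGetD_natCast]
      exact hm i k hi hk'
    rw [this]
    simp
  rw [this]
  simp

lemma inner_stay (n : Nat) (l : List Int) :
    ∀ (s : List (List Int) × List Int × List Int × Int), s.2.2.2 ≠ 0 →
      l.foldl (pvInnerBody n) s = s := by
  induction l with
  | nil => intro s _; rfl
  | cons a t ih =>
      intro s hs
      rw [List.foldl_cons, show pvInnerBody n s a = s from by
        unfold pvInnerBody; rw [if_neg]; tauto]
      exact ih s hs

lemma inner_char (n : Nat) (l : List Int) :
    ∀ (m : List (List Int)) (array arr : List Int),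
      l.foldl (pvInnerBody n) (m, array, arr, 0) =
        match l.find? (fun x => decide (PySem.List.pyGetD arr x 0 = 1)) with
        | none => (m, array, arr, 0)
        | some x => (pvZeroCross m n x, array ++ [x + 1], arr.set x.toNat 0, 1) := by
  induction l with
  | nil => intro m array arr; rfl
  | cons a t ih =>
      intro m array arr
      by_cases h : PySem.List.pyGetD arr a 0 = 1
      · rw [List.foldl_cons, List.find?_cons_of_pos (by simp [h])]
        rw [show pvInnerBody n (m, array, arr, 0) a
              = (pvZeroCross m n a, array ++ [a + 1], arr.set a.toNat 0, 1) from by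
          unfold pvInnerBody; rw [if_pos ⟨h, rfl⟩]; rfl]
        exact inner_stay n t _ (by simp)
      · rw [List.foldl_cons, List.find?_cons_of_neg (by simp [h])]
        rw [show pvInnerBody n (m, array, arr, 0) a = (m, array, arr, 0) from by
          unfold pvInnerBody; rw [if_neg]; tauto]
        exact ih m array arr

lemma outer_char (n : Nat) (M : List (List Int)) (r : List Bool) (deg : List Int)
    (m : List (List Int)) (array : List Int)
    (hm : ∀ i j, i < n → j < n → (m.getD i []).getD j 0 = mval M r i j)
    (hdeg : ∀ i, i < n → deg.getD i 0 = refDeg M r n i) (y : Int) :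
    pvOuterBody n (m, array) y =
      match (List.range n).find? (fun x => deg.getD x 0 == 1) with
      | none => (m, array)
      | some ind => (pvZeroCross m n (ind : Int), array ++ [(ind : Int) + 1]) := by
  unfold pvOuterBody pvArr
  dsimp only
  rw [PySem.List.foldl_append_singleton_eq_map, List.nil_append, inner_char]
  rw [PySem.List.pyRange_zero_natCast, List.map_map, List.find?_map]
  have hcongr : (List.range n).find?
        ((fun x => decide (PySem.List.pyGetD
            (List.map (pvDegRow m n ∘ fun k => ((k : Nat) : Int)) (List.range n)) x 0 = 1))
          ∘ fun k => ((k : Nat) : Int))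
      = (List.range n).find? (fun x => deg.getD x 0 == 1) := by
    apply find?_congrMem
    intro k hk
    have hk' : k < n := List.mem_range.mp hk
    simp only [Function.comp]
    rw [PySem.List.pyGetD_natCast, PySem.List.getD_map_range _ _ _ _ hk']
    simp only [Function.comp]
    simp only [pvDegRow_eq M m r n hm k hk']
    rw [hdeg k hk']
    rfl
  rw [hcongr]
  cases hfind : (List.range n).find? (fun x => deg.getD x 0 == 1) with
  | none => simp
  | some ind => simp

lemma refDeg_removed (M : List (List Int)) (r : List Bool) (n i : Nat)
    (h : r.getD i false = true) : refDeg M r n i = 0 := by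
  unfold refDeg
  have : (List.range n).countP (fun j => mval M r i j == 1) = 0 := by
    rw [List.countP_eq_zero]
    intro j _
    simp only [mval]
    rw [h]
    simp
  rw [this]
  rfl

lemma updFold_len (M : List (List Int)) (r' : List Bool) (ind : Nat) :
    ∀ (k : Nat) (deg' : List Int),
      ((List.range k).foldl
          (fun deg l =>
            if !(r'.getD l false) && ((M.getD l []).getD ind 0 == 1) then
              deg.set l (deg.getD l 0 - 1)
            else deg) deg').length = deg'.length := by
  intro k
  induction k with
  | zero => intro deg'; rfl
  | succ k ih =>
      intro deg'
      rw [List.range_succ, List.foldl_append]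
      simp only [List.foldl_cons, List.foldl_nil]
      split_ifs
      · rw [List.length_set]; exact ih deg'
      · exact ih deg'

lemma updFold_char (M : List (List Int)) (r' : List Bool) (ind : Nat) :
    ∀ (k : Nat) (deg' : List Int) (i : Nat),
      ((List.range k).foldl
          (fun deg l =>
            if !(r'.getD l false) && ((M.getD l []).getD ind 0 == 1) then
              deg.set l (deg.getD l 0 - 1)
            else deg) deg').getD i 0 =
        if i < k ∧ (!(r'.getD i false) && ((M.getD i []).getD ind 0 == 1)) = true ∧ i < deg'.length
        then deg'.getD i 0 - 1 else deg'.getD i 0 := by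
  intro k
  induction k with
  | zero =>
      intro deg' i
      rw [if_neg (by rintro ⟨h, -⟩; omega)]
      rfl
  | succ k ih =>
      intro deg' i
      rw [List.range_succ, List.foldl_append]
      simp only [List.foldl_cons, List.foldl_nil]
      by_cases hg : (!(r'.getD k false) && ((M.getD k []).getD ind 0 == 1)) = true
      · rw [if_pos hg, getD_set, updFold_len M r' ind k deg', ih, ih]
        by_cases hgi : (!(r'.getD i false) && ((M.getD i []).getD ind 0 == 1)) = true
        · simp only [hgi, true_and]
          by_cases hik : i = k
          · subst hik
            split_ifs <;> omega
          · split_ifs <;> omega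
        · simp only [Bool.not_eq_true] at hgi
          simp only [hgi, Bool.false_eq_true, false_and, and_false, if_false]
          by_cases hik : i = k
          · subst hik
            rw [hgi] at hg
            simp at hg
          · rw [if_neg (by rintro ⟨h, -⟩; exact hik h)]
      · rw [if_neg hg, ih]
        by_cases hgi : (!(r'.getD i false) && ((M.getD i []).getD ind 0 == 1)) = true
        · simp only [hgi, true_and]
          by_cases hik : i = k
          · subst hik
            exact absurd hgi hg
          · split_ifs <;> omega
        · simp only [Bool.not_eq_true] at hgi
          simp only [hgi, Bool.false_eq_true, false_and, and_false, if_false]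

lemma new_deg (M : List (List Int)) (n : Nat) (r : List Bool) (deg : List Int) (ind : Nat)
    (hr : r.length = n) (hd : deg.length = n)
    (hdeg : ∀ i, i < n → deg.getD i 0 = refDeg M r n i)
    (hind : ind < n) (hrind : r.getD ind false = false) :
    ∀ i, i < n →
      (pvAltUpdate M n (r.set ind true) (deg.set ind 0) ind).getD i 0
        = refDeg M (r.set ind true) n i := by
  intro i hi
  have hr' : ∀ j, (r.set ind true).getD j false = if j = ind then true else r.getD j false := by
    intro j
    rw [getD_set]
    split_ifs <;> simp_all
  have hd' : ∀ j, (deg.set ind 0).getD j 0 = if j = ind then 0 else deg.getD j 0 := by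
    intro j
    rw [getD_set]
    split_ifs <;> simp_all
  unfold pvAltUpdate
  rw [updFold_char]
  by_cases hiind : i = ind
  · subst hiind
    rw [if_neg (by
      rintro ⟨-, hc, -⟩
      rw [hr' i, if_pos rfl] at hc
      simp at hc)]
    rw [hd', if_pos rfl]
    rw [refDeg_removed M _ n i (by rw [hr' i, if_pos rfl])]
  · by_cases hri : r.getD i false = true
    · rw [if_neg (by
        rintro ⟨-, hc, -⟩
        rw [hr' i, if_neg hiind, hri] at hc
        simp at hc)]
      rw [hd', if_neg hiind, hdeg i hi, refDeg_removed M r n i hri,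
          refDeg_removed M _ n i (by rw [hr' i, if_neg hiind]; exact hri)]
    · have hri' : r.getD i false = false := by simp_all
      by_cases hMi : (M.getD i []).getD ind 0 = 1
      · rw [if_pos ⟨hi, by rw [hr' i, if_neg hiind, hri', hMi]; rfl, by rw [List.length_set]; omega⟩]
        rw [hd', if_neg hiind, hdeg i hi]
        have hpoint : (List.range n).countP (fun j => mval M r i j == 1)
            = (List.range n).countP (fun j => mval M (r.set ind true) i j == 1) + 1 := by
          apply countP_range_point n ind hind
          · intro j hj
            simp only [mval]
            rw [hr' i, if_neg hiind, hr' j, if_neg hj]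
          · simp only [mval]
            rw [hri', hrind, hMi]
            rfl
          · simp only [mval]
            rw [hr' ind, if_pos rfl]
            simp
        unfold refDeg
        rw [hpoint]
        push_cast
        ring
      · rw [if_neg (by
          rintro ⟨-, hc, -⟩
          rw [hr' i, if_neg hiind, hri'] at hc
          simp only [Bool.not_false, Bool.true_and] at hc
          exact hMi (by simpa using hc))]
        rw [hd', if_neg hiind, hdeg i hi]
        unfold refDeg
        have : (List.range n).countP (fun j => mval M r i j == 1)
            = (List.range n).countP (fun j => mval M (r.set ind true) i j == 1) := by
          apply List.countP_congr
          intro j _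
          by_cases hj : j = ind
          · subst hj
            simp only [mval]
            rw [hri', hrind, hr' i, if_neg hiind, hri', hr' j, if_pos rfl]
            exact iff_of_false (by simpa using hMi) (by simp)
          · simp only [mval]
            rw [hr' i, if_neg hiind, hr' j, if_neg hj]
        rw [this]

lemma pvAltLoop_none (M : List (List Int)) (n fuel : Nat) (deg : List Int) (r : List Bool)
    (out : List Int) (h : (List.range n).find? (fun x => deg.getD x 0 == 1) = none) :
    pvAltLoop M n fuel deg r out = out := by
  cases fuel with
  | zero => rfl
  | succ fuel =>
      simp only [pvAltLoop]
      rw [h]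

lemma zero_inv (M m : List (List Int)) (r : List Bool) (n ind : Nat)
    (hr : r.length = n)
    (hm : ∀ i j, i < n → j < n → (m.getD i []).getD j 0 = mval M r i j)
    (hind : ind < n) :
    ∀ i j, i < n → j < n →
      ((pvZeroCross m n (ind : Int)).getD i []).getD j 0 = mval M (r.set ind true) i j := by
  have hr' : ∀ k, (r.set ind true).getD k false = if k = ind then true else r.getD k false := by
    intro k
    rw [getD_set]
    split_ifs <;> simp_all
  intro i j hi hj
  rw [pvZeroCross_entry]
  by_cases hcase : (i < n ∧ j = ind) ∨ (i = ind ∧ j < n)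
  · rw [if_pos hcase]
    simp only [mval]
    rcases hcase with ⟨-, hj'⟩ | ⟨hi', -⟩
    · rw [hr' j, if_pos hj']
      simp
    · rw [hr' i, if_pos hi']
      simp
  · rw [if_neg hcase]
    have hji : j ≠ ind := fun h => hcase (Or.inl ⟨hi, h⟩)
    have hii : i ≠ ind := fun h => hcase (Or.inr ⟨h, hj⟩)
    rw [hm i j hi hj]
    simp only [mval]
    rw [hr' i, if_neg hii, hr' j, if_neg hji]

lemma main_loop (M : List (List Int)) (n : Nat) (ys : List Int) :
    ∀ (m : List (List Int)) (deg : List Int) (r : List Bool) (array : List Int),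
      (∀ i j, i < n → j < n → (m.getD i []).getD j 0 = mval M r i j) →
      r.length = n → deg.length = n →
      (∀ i, i < n → deg.getD i 0 = refDeg M r n i) →
      (ys.foldl (pvOuterBody n) (m, array)).2 = pvAltLoop M n ys.length deg r array := by
  induction ys with
  | nil =>
      intro m deg r array _ _ _ _
      rfl
  | cons y ys ih =>
      intro m deg r array hm hrl hdl hdeg
      rw [List.foldl_cons, outer_char n M r deg m array hm hdeg y]
      cases hfind : (List.range n).find? (fun x => deg.getD x 0 == 1) with
      | none =>
          rw [show (match (none : Option Nat) with
                | none => (m, array)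
                | some ind => (pvZeroCross m n (ind : Int), array ++ [(ind : Int) + 1]))
              = (m, array) from rfl]
          rw [ih m deg r array hm hrl hdl hdeg,
              pvAltLoop_none M n ys.length deg r array hfind,
              pvAltLoop_none M n (y :: ys).length deg r array hfind]
      | some ind =>
          have hind : ind < n := List.mem_range.mp (List.mem_of_find?_eq_some hfind)
          have hdi : deg.getD ind 0 = 1 := by
            have := List.find?_some hfind
            simpa using this
          have hrind : r.getD ind false = false := by
            by_contra h
            rw [hdeg ind hind, refDeg_removed M r n ind (by simpa using h)] at hdi
            exact absurd hdi (by norm_num)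
          rw [show (match (some ind : Option Nat) with
                | none => (m, array)
                | some ind => (pvZeroCross m n (ind : Int), array ++ [(ind : Int) + 1]))
              = (pvZeroCross m n (ind : Int), array ++ [(ind : Int) + 1]) from rfl]
          rw [show pvAltLoop M n (y :: ys).length deg r array
                = pvAltLoop M n ys.length
                    (pvAltUpdate M n (r.set ind true) (deg.set ind 0) ind)
                    (r.set ind true) (array ++ [(ind : Int) + 1]) from by
            simp only [List.length_cons, pvAltLoop]
            rw [hfind]]
          exact ih _ _ _ _
            (zero_inv M m r n ind hrl hm hind)
            (by rw [List.length_set, hrl])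
            (by unfold pvAltUpdate; rw [updFold_len, List.length_set, hdl])
            (new_deg M n r deg ind hrl hdl hdeg hind hrind)

lemma count_take_range : ∀ (n : Nat) (row : List Int),
    (row.take n).countP (fun v => v == 1) = (List.range n).countP (fun j => row.getD j 0 == 1) := by
  intro n
  induction n with
  | zero => intro row; rfl
  | succ n ih =>
      intro row
      rw [List.range_succ, List.countP_append, ← ih row, List.take_add_one, List.countP_append]
      congr 1
      cases h : row[n]? with
      | none => simp [h]
      | some v => simp [h]

lemma init_hm (M : List (List Int)) (n : Nat) :
    ∀ i j, i < n → j < n →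
      (M.getD i []).getD j 0 = mval M (List.replicate n false) i j := by
  intro i j hi hj
  simp only [mval]
  rw [List.getD_replicate _ hi, List.getD_replicate _ hj]
  simp

lemma init_deg (M : List (List Int)) (n : Nat) (hn : n = M.length) (i : Nat) (hi : i < n) :
    (M.map (fun row =>
        ((PySem.List.count (PySem.List.slice row none (some (n : Int))) 1 : Nat) : Int))).getD i 0
      = refDeg M (List.replicate n false) n i := by
  have h1 : (M.map (fun row =>
        ((PySem.List.count (PySem.List.slice row none (some (n : Int))) 1 : Nat) : Int))).getD i 0
      = ((PySem.List.count (PySem.List.slice (M.getD i []) none (some (n : Int))) 1 : Nat) : Int) := by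
    have hi' : i < M.length := by omega
    simp [List.getD, List.getElem?_map, List.getElem?_eq_getElem hi']
  rw [h1, PySem.List.slice_to _ (by positivity)]
  rw [show ((n : Int)).toNat = n from rfl]
  have h2 : PySem.List.count ((M.getD i []).take n) 1
      = ((M.getD i []).take n).countP (fun v => v == 1) := by
    simp [PySem.List.count, List.count]
  rw [h2, count_take_range]
  unfold refDeg
  congr 1
  apply List.countP_congr
  intro j hj
  have hj' : j < n := List.mem_range.mp hj
  simp only [mval]
  rw [List.getD_replicate _ hi, List.getD_replicate _ hj']
  simp

lemma pyRange_len2 (n : Nat) : (PySem.List.pyRange 0 ((n : Int) - 2) 1).length = n - 2 := by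
  match n with
  | 0 => rfl
  | 1 => rfl
  | (k + 2) =>
      have h2 : (((k + 2 : Nat) : Int)) - 2 = ((k : Nat) : Int) := by push_cast; ring
      rw [h2, PySem.List.pyRange_zero_natCast]
      simp

-- ===== VERDICT (by name: the statement is the Claim_ definition above) =====
theorem step_spec : Claim_equal_step := by
  unfold Claim_equal_step Spec_step
  intro M _ _
  have hstep : step M
      = ((PySem.List.pyRange 0 ((M.length : Int) - 2) 1).foldl
          (pvOuterBody M.length) (M, [])).2 := rfl
  have halt : step_alt M
      = pvAltLoop M M.length (M.length - 2)
          (M.map (fun row =>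
            ((PySem.List.count (PySem.List.slice row none (some (M.length : Int))) 1 : Nat) : Int)))
          (List.replicate M.length false) [] := rfl
  rw [hstep, halt]
  rw [main_loop M M.length _ M _ _ [] (init_hm M M.length)
        (List.length_replicate) (by simp)
        (fun i hi => init_deg M M.length rfl i hi)]
  rw [pyRange_len2]
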